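-- pv_equiv track=rewrite | github.com/imthomp/seating-chart-generator | seating_algorithm.py | calculate_chart_dimensions
-- ===== SOURCE A (Python) =====
-- import math
--
-- def calculate_chart_dimensions(num_singers: int, num_parts: int, layout: str) -> tuple[int, int]:
--     """
--     Calculate reasonable row and seat counts for a given number of singers.
--
--     Args:
--         num_singers: Total number of singers
--         num_parts: Number of voice parts
--         layout: "side-by-side" or "stacked"
--
--     Returns:
--         Tuple of (rows, seats_per_row)
--     """
--     # Aim for roughly 10-15 singers per row
--     target_per_row = 12
--     rows = max(2, math.ceil(num_singers / target_per_row))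
--
--     if layout == "stacked":
--         # Make rows divisible by num_parts for clean splits
--         while rows % num_parts != 0:
--             rows += 1
--
--     seats_per_row = math.ceil(num_singers / rows)
--
--     if layout == "side-by-side":
--         # Make seats divisible by num_parts for clean splits
--         while seats_per_row % num_parts != 0:
--             seats_per_row += 1
--
--     return rows, seats_per_row
-- ===== SOURCE B (Python) =====
-- import math
--
-- def calculate_chart_dimensions(num_singers: int, num_parts: int, layout: str) -> tuple[int, int]:
--     """Same dimensions as A, but each round-up-to-a-multiple while loop is
--     replaced by one closed-form modular-arithmetic step."""
--     target_per_row = 12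
--     rows = max(2, math.ceil(num_singers / target_per_row))
--
--     if layout == "stacked":
--         # round rows up to the next multiple of |num_parts| in O(1)
--         rows += (-rows) % abs(num_parts)
--
--     seats_per_row = math.ceil(num_singers / rows)
--
--     if layout == "side-by-side":
--         seats_per_row += (-seats_per_row) % abs(num_parts)
--
--     return rows, seats_per_row
-- ===== Notes on version B (the rewrite author's own statement) =====
-- stated objective: faster
-- what changed: Each 'while x % num_parts != 0: x += 1' round-up loop (up to |num_parts|-1 iterations) is replaced by a single closed-form step x += (-x) % abs(num_parts).
import Mathlib
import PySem

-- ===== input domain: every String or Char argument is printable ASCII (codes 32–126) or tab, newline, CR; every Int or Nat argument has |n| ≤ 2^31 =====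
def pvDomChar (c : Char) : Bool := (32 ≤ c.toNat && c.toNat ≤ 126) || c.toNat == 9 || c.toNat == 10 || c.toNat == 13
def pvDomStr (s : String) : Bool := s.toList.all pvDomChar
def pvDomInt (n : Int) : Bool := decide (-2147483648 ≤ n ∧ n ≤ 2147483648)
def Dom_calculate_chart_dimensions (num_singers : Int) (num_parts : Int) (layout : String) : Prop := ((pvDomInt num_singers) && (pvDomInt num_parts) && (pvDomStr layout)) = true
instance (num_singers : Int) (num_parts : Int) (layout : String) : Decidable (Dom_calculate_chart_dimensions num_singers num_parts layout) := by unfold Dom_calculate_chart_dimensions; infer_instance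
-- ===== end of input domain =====

-- B replaces A's two increment-until-divisible while loops by one closed-form
-- modular-arithmetic step each (faster: O(1) instead of O(|num_parts|) per loop).

-- math.ceil(a / b) for an int a and positive int b (exact on the domain): -((-a) // b)
def pvCeilDiv (a b : Int) : Int := -(PySem.Int.floordiv (-a) b)

-- ===== PORT A =====
-- A's 'while x % n != 0: x += 1'; fuel n.natAbs suffices (n ≠ 0 is in Pre_)
def pvRoundUpLoop (fuel : Nat) (x n : Int) : Int :=
  match fuel with
  | 0 => x
  | f + 1 => if PySem.Int.mod x n ≠ 0 then pvRoundUpLoop f (x + 1) n else x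

def calculate_chart_dimensions (num_singers : Int) (num_parts : Int) (layout : String) : Int × Int :=
  let rows := max 2 (pvCeilDiv num_singers 12)
  let rows := if layout = "stacked" then pvRoundUpLoop num_parts.natAbs rows num_parts else rows
  let seats_per_row := pvCeilDiv num_singers rows
  let seats_per_row := if layout = "side-by-side" then pvRoundUpLoop num_parts.natAbs seats_per_row num_parts else seats_per_row
  (rows, seats_per_row)

-- ===== PORT B =====
def calculate_chart_dimensions_alt (num_singers : Int) (num_parts : Int) (layout : String) : Int × Int :=
  let rows := max 2 (pvCeilDiv num_singers 12)
  let rows := if layout = "stacked" then rows + PySem.Int.mod (-rows) (num_parts.natAbs : Int) else rows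
  let seats_per_row := pvCeilDiv num_singers rows
  let seats_per_row := if layout = "side-by-side" then seats_per_row + PySem.Int.mod (-seats_per_row) (num_parts.natAbs : Int) else seats_per_row
  (rows, seats_per_row)

-- ===== PRECONDITION & SPEC =====
-- Pre_ excludes only num_parts = 0 together with a layout that enters a round-up
-- branch: there Python A (and B) raise ZeroDivisionError.
def Pre_calculate_chart_dimensions (num_singers : Int) (num_parts : Int) (layout : String) : Prop :=
  num_parts ≠ 0 ∨ (layout ≠ "stacked" ∧ layout ≠ "side-by-side")
instance (num_singers : Int) (num_parts : Int) (layout : String) : Decidable (Pre_calculate_chart_dimensions num_singers num_parts layout) := by unfold Pre_calculate_chart_dimensions; infer_instance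

def pvWitness_calculate_chart_dimensions : Int × Int × String := (20, 3, "stacked")

def Spec_calculate_chart_dimensions (num_singers : Int) (num_parts : Int) (layout : String) (out : Int × Int) : Prop := out = calculate_chart_dimensions_alt num_singers num_parts layout
instance (num_singers : Int) (num_parts : Int) (layout : String) (out : Int × Int) : Decidable (Spec_calculate_chart_dimensions num_singers num_parts layout out) := by unfold Spec_calculate_chart_dimensions; infer_instance

-- ===== CLAIM (what is proved, stated in full; the proofs are below) =====
def Claim_equal_calculate_chart_dimensions : Prop := ∀ (num_singers : Int) (num_parts : Int) (layout : String), Dom_calculate_chart_dimensions num_singers num_parts layout → Pre_calculate_chart_dimensions num_singers num_parts layout → Spec_calculate_chart_dimensions num_singers num_parts layout (calculate_chart_dimensions num_singers num_parts layout)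

-- ===== LEMMAS AND PROOFS =====

-- A's increment loop computes the closed-form round-up, given enough fuel.
theorem pvRoundUpLoop_closed (n : Int) (hn : n ≠ 0) :
    ∀ (fuel : Nat) (x : Int), ((-x) % (n.natAbs : Int)).toNat ≤ fuel →
      pvRoundUpLoop fuel x n = x + (-x) % (n.natAbs : Int) := by
  have hN : (0 : Int) < (n.natAbs : Int) := by
    have := Int.natAbs_pos.mpr hn; exact_mod_cast this
  intro fuel
  induction fuel with
  | zero =>
    intro x hx
    have h0 : (0 : Int) ≤ (-x) % (n.natAbs : Int) := Int.emod_nonneg _ (by omega)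
    simp only [pvRoundUpLoop]
    omega
  | succ f ih =>
    intro x hx
    have h0 : (0 : Int) ≤ (-x) % (n.natAbs : Int) := Int.emod_nonneg _ (by omega)
    have hlt : (-x) % (n.natAbs : Int) < (n.natAbs : Int) := Int.emod_lt_of_pos _ hN
    have hdvd_iff : PySem.Int.mod x n = 0 ↔ (-x) % (n.natAbs : Int) = 0 := by
      rw [PySem.Int.mod_eq_zero_iff_dvd]
      constructor
      · intro h
        have : ((n.natAbs : Int)) ∣ -x := (Int.natAbs_dvd.mpr h).neg_right
        exact Int.emod_eq_zero_of_dvd this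
      · intro h
        have : ((n.natAbs : Int)) ∣ -x := Int.dvd_of_emod_eq_zero h
        have : ((n.natAbs : Int)) ∣ x := (dvd_neg.mp this)
        exact Int.natAbs_dvd.mp this
    by_cases hz : (-x) % (n.natAbs : Int) = 0
    · have hm : PySem.Int.mod x n = 0 := hdvd_iff.mpr hz
      simp only [pvRoundUpLoop, hm, ne_eq, not_true_eq_false, if_false, hz, add_zero]
    · have hmod : PySem.Int.mod x n ≠ 0 := fun h => hz (hdvd_iff.mp h)
      have hr1 : (1 : Int) ≤ (-x) % (n.natAbs : Int) := by omega
      have hstep : (-(x + 1)) % (n.natAbs : Int) = (-x) % (n.natAbs : Int) - 1 := by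
        have h1 : -(x + 1) = (-x) - 1 := by ring
        rw [h1, Int.sub_emod]
        have hN2 : (1 : Int) < (n.natAbs : Int) := by omega
        rw [Int.emod_eq_of_lt (by omega) hN2]
        exact Int.emod_eq_of_lt (by omega) (by omega)
      have hfuel : ((-(x + 1)) % (n.natAbs : Int)).toNat ≤ f := by
        rw [hstep]; omega
      have := ih (x + 1) hfuel
      simp only [pvRoundUpLoop, if_pos hmod, this, hstep]
      ring

theorem pvRoundUp_eq (n x : Int) (hn : n ≠ 0) :
    pvRoundUpLoop n.natAbs x n = x + PySem.Int.mod (-x) (n.natAbs : Int) := by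
  have hN : (0 : Int) < (n.natAbs : Int) := by
    have := Int.natAbs_pos.mpr hn; exact_mod_cast this
  rw [PySem.Int.mod_eq_emod_of_pos hN]
  apply pvRoundUpLoop_closed n hn
  have := Int.emod_lt_of_pos (-x) hN
  omega

-- ===== VERDICT (by name: the statement is the Claim_ definition above) =====
theorem calculate_chart_dimensions_spec : Claim_equal_calculate_chart_dimensions := by
  intro ns np layout _ hpre
  unfold Spec_calculate_chart_dimensions calculate_chart_dimensions calculate_chart_dimensions_alt
  by_cases hs : layout = "stacked"
  · have hnp : np ≠ 0 := by
      rcases hpre with h | ⟨h, _⟩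
      · exact h
      · exact absurd hs h
    subst hs
    simp only [if_neg (show ¬("stacked" : String) = "side-by-side" by decide),
      pvRoundUp_eq _ _ hnp]
  · by_cases hb : layout = "side-by-side"
    · have hnp : np ≠ 0 := by
        rcases hpre with h | ⟨_, h⟩
        · exact h
        · exact absurd hb h
      simp only [if_neg hs, if_pos hb, pvRoundUp_eq _ _ hnp]
    · simp only [if_neg hs, if_neg hb]
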